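-- pv_equiv track=rewrite | github.com/ufora/ufora | build/cppml.py | replaceHppmlIncludes
-- ===== SOURCE A (Python) =====
-- def replaceHppmlIncludes(content):
--     lines = content.split("\n")
--     newContent = []
--
--     for l in lines:
--         if l.strip().startswith("#include"):
--             newContent.append(l.replace(".hppml", ".hpp_hppml"))
--         else:
--             newContent.append(l)
--     return "\n".join(newContent)
-- ===== SOURCE B (Python) =====
-- import re
--
-- _INCLUDE_LINE = re.compile(r'^[ \t\f\v\r]*#include.*$', re.MULTILINE)
--
--
-- def replaceHppmlIncludes(content):
--     return _INCLUDE_LINE.sub(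
--         lambda m: m.group(0).replace(".hppml", ".hpp_hppml"), content)
-- ===== Notes on version B (the rewrite author's own statement) =====
-- stated objective: idiomatic
-- what changed: A splits the content into a line list, rewrites each line in a Python loop and joins the list back; B performs one re.sub over the whole content with a MULTILINE regex matching include lines and a callback doing the per-line replacement, building no line list.
import Mathlib
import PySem

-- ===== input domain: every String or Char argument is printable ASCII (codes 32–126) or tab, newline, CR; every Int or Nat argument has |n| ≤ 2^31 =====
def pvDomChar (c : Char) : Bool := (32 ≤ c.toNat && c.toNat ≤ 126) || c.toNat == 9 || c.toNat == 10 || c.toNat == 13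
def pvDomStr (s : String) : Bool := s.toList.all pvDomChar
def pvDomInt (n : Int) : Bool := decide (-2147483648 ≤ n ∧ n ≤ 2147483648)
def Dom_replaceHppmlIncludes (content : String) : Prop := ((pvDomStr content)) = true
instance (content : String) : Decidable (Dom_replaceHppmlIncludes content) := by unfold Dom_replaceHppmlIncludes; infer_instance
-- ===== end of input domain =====

set_option maxRecDepth 8000

-- B rewrites #include lines by one regex substitution instead of A's split/loop/join;
-- same return value on the stated domain, structurally different traversal (objective: idiomatic).

-- ===== PORT A =====
def replaceHppmlIncludes (content : String) : String :=
  let lines := (PySem.Str.split? content "\n").getD []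
  let newContent := lines.foldl (fun acc l =>
    if PySem.Str.startswith (PySem.Str.strip l) "#include" then
      acc ++ [PySem.Str.replace l ".hppml" ".hpp_hppml"]
    else
      acc ++ [l]) ([] : List String)
  PySem.Str.join "\n" newContent

-- ===== PORT B =====
-- Hand port of Source B's single `re.sub(r'^[ \t\f\v\r]*#include.*$', repl, content, re.MULTILINE)`:
-- `^` matches at position 0 and after each '\n'; `[ \t\f\v\r]*` then the literal `#include`
-- succeed exactly when the line lstripped of those characters starts with "#include";
-- `.*$` extends the match to the end of that line (up to the next '\n'); the callback
-- replaces ".hppml" by ".hpp_hppml" inside the matched line; unmatched text (including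
-- every '\n') is copied unchanged.  Exact for this pattern on any input.
def pvLineWs (c : Char) : Bool :=
  c.toNat == 32 || c.toNat == 9 || c.toNat == 12 || c.toNat == 11 || c.toNat == 13

def pvSubGo (cs : List Char) : List Char :=
  let line := cs.takeWhile (fun c => c != '\n')
  let rest := cs.drop line.length
  let out := if PySem.Chars.startswith (line.dropWhile pvLineWs) "#include".toList then
      PySem.Chars.replace line ".hppml".toList ".hpp_hppml".toList
    else line
  if rest.isEmpty then out else out ++ '\n' :: pvSubGo rest.tail
termination_by cs.length
decreasing_by
  rename_i h
  rw [Bool.not_eq_true, List.isEmpty_eq_false_iff] at h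
  have h4 : 0 < (cs.drop ((cs.takeWhile (fun c => c != '\n')).length)).length :=
    List.length_pos_of_ne_nil h
  have h2 := List.length_drop (l := cs) (i := (cs.takeWhile (fun c => c != '\n')).length)
  show ((cs.drop ((cs.takeWhile (fun c => c != '\n')).length)).tail).length < cs.length
  simp only [List.length_tail]
  omega

def replaceHppmlIncludes_alt (content : String) : String :=
  String.ofList (pvSubGo content.toList)

-- ===== PRECONDITION & SPEC =====
def Spec_replaceHppmlIncludes (content : String) (out : String) : Prop := out = replaceHppmlIncludes_alt content
instance (content : String) (out : String) : Decidable (Spec_replaceHppmlIncludes content out) := by unfold Spec_replaceHppmlIncludes; infer_instance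

-- ===== CLAIM (what is proved, stated in full; the proofs are below) =====
def Claim_equal_replaceHppmlIncludes : Prop := ∀ (content : String), Dom_replaceHppmlIncludes content → Spec_replaceHppmlIncludes content (replaceHppmlIncludes content)

-- ===== LEMMAS AND PROOFS =====

-- reference characterisation of `content.split("\n")`
def splitNl : List Char → List (List Char)
  | [] => [[]]
  | c :: t => if c = '\n' then [] :: splitNl t else
      match splitNl t with
      | [] => [[c]]
      | h :: r => (c :: h) :: r

theorem splitNl_ne_nil (cs : List Char) : splitNl cs ≠ [] := by
  cases cs with
  | nil => simp [splitNl]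
  | cons c t =>
    simp only [splitNl]
    split
    · simp
    · split <;> simp

theorem go_eq (l : List Char) : ∀ (fuel : Nat) (cur : List Char) (acc : List (List Char)),
    l.length < fuel →
    PySem.Chars.splitOn.go ['\n'] fuel l cur acc
      = acc.reverse ++ (match splitNl l with
          | [] => [cur.reverse]
          | h :: r => (cur.reverse ++ h) :: r) := by
  induction l with
  | nil =>
    intro fuel cur acc hf
    match fuel, hf with
    | fuel+1, _ =>
      rw [PySem.Chars.splitOn.go]
      simp [splitNl]
      omega
  | cons c t ih =>
    intro fuel cur acc hf
    match fuel, hf with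
    | fuel+1, hf =>
      by_cases hc : c = '\n'
      · subst hc
        rw [PySem.Chars.splitOn.go]
        simp only [List.isPrefixOf, BEq.rfl, Bool.true_and, if_true,
          List.length_cons, List.length_nil, Nat.zero_add, List.drop_succ_cons,
          List.drop_zero] at *
        rw [ih fuel [] (cur.reverse :: acc) (by omega)]
        simp only [splitNl]
        cases h : splitNl t with
        | nil => exact absurd h (splitNl_ne_nil t)
        | cons h r => simp
      · rw [PySem.Chars.splitOn.go]
        simp only [List.length_cons] at hf
        simp only [List.isPrefixOf, List.isPrefixOf_nil_left, Bool.and_true, beq_iff_eq,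
          eq_comm (a := '\n'), hc, decide_false, Bool.false_eq_true, if_false]
        rw [ih fuel (c :: cur) acc (by omega)]
        simp only [splitNl, if_neg hc]
        cases h : splitNl t with
        | nil => exact absurd h (splitNl_ne_nil t)
        | cons h r => simp

theorem splitOn_nl (cs : List Char) : PySem.Chars.splitOn cs ['\n'] = splitNl cs := by
  rw [PySem.Chars.splitOn, go_eq cs (cs.length + 1) [] [] (by omega)]
  cases h : splitNl cs with
  | nil => exact absurd h (splitNl_ne_nil cs)
  | cons h r => simp

theorem dropWhile_congr' {p q : Char → Bool} : ∀ (l : List Char), (∀ c ∈ l, p c = q c) →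
    l.dropWhile p = l.dropWhile q := by
  intro l h
  induction l with
  | nil => rfl
  | cons c t ih =>
    simp only [List.dropWhile_cons]
    rw [h c (by simp)]
    split
    · exact ih (fun c hc => h c (by simp [hc]))
    · rfl

-- rstrip does not affect a test for a whitespace-free prefix
theorem startswith_rstrip (y p : List Char) (hp : ∀ c ∈ p, PySem.Chars.isspace c = false) :
    PySem.Chars.startswith (PySem.Chars.rstrip y) p = PySem.Chars.startswith y p := by
  simp only [PySem.Chars.startswith, PySem.Chars.rstrip]
  by_cases h : p.isPrefixOf y
  · rw [List.isPrefixOf_iff_prefix] at h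
    obtain ⟨z, hz⟩ := h
    subst hz
    simp only [List.reverse_append, List.dropWhile_append]
    split
    · have : List.dropWhile PySem.Chars.isspace p.reverse = p.reverse := by
        apply List.dropWhile_eq_self_iff.mpr
        intro h0
        have hm := hp p.reverse[0] (List.mem_reverse.mp (List.getElem_mem h0))
        simpa using hm
      rw [this, List.reverse_reverse]
      rw [List.isPrefixOf_iff_prefix.mpr List.prefix_rfl,
        List.isPrefixOf_iff_prefix.mpr (List.prefix_append _ _)]
    · rw [List.reverse_append, List.reverse_reverse,
        List.isPrefixOf_iff_prefix.mpr (List.prefix_append _ _),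
        List.isPrefixOf_iff_prefix.mpr (List.prefix_append _ _)]
  · have h2 : ¬ p.isPrefixOf ((List.dropWhile PySem.Chars.isspace y.reverse).reverse) := by
      intro hc
      apply h
      rw [List.isPrefixOf_iff_prefix] at *
      exact hc.trans (by
        have : (List.dropWhile PySem.Chars.isspace y.reverse) <:+ y.reverse := List.dropWhile_suffix _
        have := List.reverse_prefix.mpr this
        simpa using this)
    simp [h, h2]

theorem char_toNat_ne (c d : Char) (h : c ≠ d) : c.toNat ≠ d.toNat := by
  intro hn
  exact h (Char.ext (by
    have : c.val.toNat = d.val.toNat := hn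
    exact UInt32.toNat_inj.mp this))

-- A's include test equals B's, on newline-free lines over the domain alphabet
theorem cond_eq (l : List Char) (hdom : ∀ c ∈ l, pvDomChar c = true) (hnl : '\n' ∉ l) :
    PySem.Chars.startswith (PySem.Chars.strip l) "#include".toList
      = PySem.Chars.startswith (l.dropWhile pvLineWs) "#include".toList := by
  have hp : ∀ c ∈ "#include".toList, PySem.Chars.isspace c = false := by
    rw [show "#include".toList = ['#','i','n','c','l','u','d','e'] from rfl]
    intro c hc
    fin_cases hc <;> rfl
  rw [PySem.Chars.strip, startswith_rstrip _ _ hp, PySem.Chars.lstrip,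
    dropWhile_congr' l (fun c hc => ?_)]
  have h1 := hdom c hc
  have h2 : c.toNat ≠ 10 := char_toNat_ne c '\n' (fun he => hnl (he ▸ hc))
  simp only [pvDomChar, Bool.or_eq_true, Bool.and_eq_true, decide_eq_true_eq, beq_iff_eq] at h1
  rw [Bool.eq_iff_iff]
  simp only [PySem.Chars.isspace, pvLineWs, Bool.or_eq_true, Bool.and_eq_true, decide_eq_true_eq,
    beq_iff_eq]
  omega

-- A's per-line transformation (character level)
def fC (l : List Char) : List Char :=
  if PySem.Chars.startswith (PySem.Chars.strip l) "#include".toList then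
    PySem.Chars.replace l ".hppml".toList ".hpp_hppml".toList
  else l

theorem splitNl_head (cs : List Char) :
    splitNl cs = cs.takeWhile (fun c => c != '\n') ::
      (if (cs.drop (cs.takeWhile (fun c => c != '\n')).length).isEmpty then []
       else splitNl (cs.drop (cs.takeWhile (fun c => c != '\n')).length).tail) := by
  induction cs with
  | nil => simp [splitNl]
  | cons c t ih =>
    by_cases hc : c = '\n'
    · subst hc
      simp [splitNl]
    · have hstep : splitNl (c :: t) = match splitNl t with
          | [] => [[c]]
          | h :: r => (c :: h) :: r := by
        simp [splitNl, hc]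
      rw [hstep, ih]
      simp only [List.takeWhile_cons, bne_iff_ne, ne_eq, hc, not_false_eq_true, decide_true,
        if_true, List.length_cons, List.drop_succ_cons]

theorem join_map_splitNl : ∀ (n : Nat) (cs : List Char), cs.length ≤ n →
    (∀ c ∈ cs, pvDomChar c = true) →
    PySem.Chars.join ['\n'] ((splitNl cs).map fC) = pvSubGo cs := by
  intro n
  induction n with
  | zero =>
    intro cs hlen _
    have : cs = [] := List.eq_nil_of_length_eq_zero (by omega)
    subst this
    rw [show splitNl [] = [[]] from rfl]
    unfold pvSubGo
    simp [fC, PySem.Chars.join_singleton, PySem.Chars.startswith, PySem.Chars.strip,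
      PySem.Chars.lstrip, PySem.Chars.rstrip, List.isPrefixOf]
  | succ n ih =>
    intro cs hlen hdom
    have hline_dom : ∀ c ∈ cs.takeWhile (fun c => c != '\n'), pvDomChar c = true :=
      fun c hc => hdom c ((List.takeWhile_prefix _).subset hc)
    have hline_nl : '\n' ∉ cs.takeWhile (fun c => c != '\n') := by
      intro hc
      have := List.mem_takeWhile_imp hc
      simp at this
    have hout : fC (cs.takeWhile (fun c => c != '\n'))
        = (if PySem.Chars.startswith ((cs.takeWhile (fun c => c != '\n')).dropWhile pvLineWs)
              "#include".toList then
            PySem.Chars.replace (cs.takeWhile (fun c => c != '\n')) ".hppml".toList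
              ".hpp_hppml".toList
          else cs.takeWhile (fun c => c != '\n')) := by
      rw [fC, cond_eq _ hline_dom hline_nl]
    rw [splitNl_head cs]
    unfold pvSubGo
    cases hrest : (cs.drop (cs.takeWhile (fun c => c != '\n')).length).isEmpty with
    | true =>
      simp only [hrest, if_true, List.map_cons, List.map_nil]
      rw [PySem.Chars.join_singleton, hout]
    | false =>
      simp only [hrest, Bool.false_eq_true, if_false, List.map_cons]
      have htail : PySem.Chars.join ['\n']
            ((splitNl (cs.drop (cs.takeWhile (fun c => c != '\n')).length).tail).map fC)
          = pvSubGo (cs.drop (cs.takeWhile (fun c => c != '\n')).length).tail := by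
        apply ih
        · have h1 := List.length_drop (l := cs) (i := (cs.takeWhile (fun c => c != '\n')).length)
          have h2 : (cs.drop (cs.takeWhile (fun c => c != '\n')).length) ≠ [] := by
            rw [← List.isEmpty_eq_false_iff, hrest]
          have h3 := List.length_pos_of_ne_nil h2
          simp only [List.length_tail]
          omega
        · intro c hc
          exact hdom c (List.mem_of_mem_drop (List.mem_of_mem_tail hc))
      cases hs : splitNl (cs.drop (cs.takeWhile (fun c => c != '\n')).length).tail with
      | nil => exact absurd hs (splitNl_ne_nil _)
      | cons h r =>
        rw [hs] at htail
        simp only [List.map_cons] at htail ⊢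
        rw [PySem.Chars.join_cons_cons, htail, hout]
        simp [List.append_assoc]

theorem foldl_step :
    ∀ (ls : List String) (acc : List String),
    ls.foldl (fun acc l =>
      if PySem.Str.startswith (PySem.Str.strip l) "#include" then
        acc ++ [PySem.Str.replace l ".hppml" ".hpp_hppml"]
      else acc ++ [l]) acc
      = acc ++ ls.map (fun l =>
          if PySem.Str.startswith (PySem.Str.strip l) "#include" then
            PySem.Str.replace l ".hppml" ".hpp_hppml"
          else l) := by
  intro ls
  induction ls with
  | nil => simp
  | cons l t ih =>
    intro acc
    simp only [List.foldl_cons, List.map_cons]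
    split <;> rw [ih] <;> simp

-- ===== VERDICT (by name: the statement is the Claim_ definition above) =====
theorem replaceHppmlIncludes_spec : Claim_equal_replaceHppmlIncludes := by
  intro content hdom
  unfold Spec_replaceHppmlIncludes replaceHppmlIncludes replaceHppmlIncludes_alt
  have hsplit := PySem.Str.split?_map content "\n"
  rw [show PySem.Chars.split? content.toList "\n".toList
      = some (PySem.Chars.splitOn content.toList ['\n']) from rfl] at hsplit
  apply String.toList_inj.mp
  rw [String.toList_ofList]
  cases h : PySem.Str.split? content "\n" with
  | none => rw [h] at hsplit; simp at hsplit
  | some LS =>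
    rw [h] at hsplit
    simp only [Option.map_some, Option.some_inj] at hsplit
    simp only [Option.getD_some]
    rw [foldl_step, List.nil_append, PySem.Str.toList_join, List.map_map]
    have hmap : (LS.map (String.toList ∘ (fun l =>
        if PySem.Str.startswith (PySem.Str.strip l) "#include" then
          PySem.Str.replace l ".hppml" ".hpp_hppml"
        else l))) = (LS.map String.toList).map fC := by
      rw [List.map_map]
      apply List.map_congr_left
      intro l _
      simp only [Function.comp_apply, fC]
      rw [show ("#include" : String).toList = "#include".toList from rfl]
      rw [← PySem.Str.toList_strip, ← PySem.Str.startswith_eq]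
      split
      · rw [PySem.Str.toList_replace]
      · rfl
    rw [hmap, hsplit, splitOn_nl]
    apply join_map_splitNl content.toList.length _ le_rfl
    intro c hc
    have : content.toList.all pvDomChar = true := hdom
    exact List.all_eq_true.mp this c hc
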